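-- pv_equiv track=rewrite | github.com/Arkadia-Oversoul-Prism/Arkadia | arkadia_console.py | score_documents
-- ===== SOURCE A (Python) =====
-- def score_documents(question: str, docs_list: list):
--     q_words = set(question.lower().split())
--     scored = []
--     for d in docs_list:
--         text = (d.get("preview") or "").lower()
--         if not text:
--             scored.append((0, d)); continue
--         overlap = len(q_words & set(text.split()))
--         scored.append((overlap, d))
--     scored.sort(key=lambda x: x[0], reverse=True)
--     return [d for score, d in scored if score > 0]
-- ===== SOURCE B (Python) =====
-- def score_documents(question: str, docs_list: list):
--     q_words = set(question.lower().split())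
--
--     def score(d):
--         text = (d.get("preview") or "").lower()
--         return len(q_words & set(text.split()))
--
--     out = []
--     s = len(q_words)
--     while s > 0:
--         out.extend(d for d in docs_list if score(d) == s)
--         s -= 1
--     return out
-- ===== Notes on version B (the rewrite author's own statement) =====
-- stated objective: alternative
-- what changed: Replaces build-score-list + stable comparison sort + positive filter with a sortless selection sweep: for each possible score from len(q_words) down to 1, collect (in input order) the docs whose overlap score equals it; score-0 docs are never collected, and stability of ties is automatic.
import Mathlib
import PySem

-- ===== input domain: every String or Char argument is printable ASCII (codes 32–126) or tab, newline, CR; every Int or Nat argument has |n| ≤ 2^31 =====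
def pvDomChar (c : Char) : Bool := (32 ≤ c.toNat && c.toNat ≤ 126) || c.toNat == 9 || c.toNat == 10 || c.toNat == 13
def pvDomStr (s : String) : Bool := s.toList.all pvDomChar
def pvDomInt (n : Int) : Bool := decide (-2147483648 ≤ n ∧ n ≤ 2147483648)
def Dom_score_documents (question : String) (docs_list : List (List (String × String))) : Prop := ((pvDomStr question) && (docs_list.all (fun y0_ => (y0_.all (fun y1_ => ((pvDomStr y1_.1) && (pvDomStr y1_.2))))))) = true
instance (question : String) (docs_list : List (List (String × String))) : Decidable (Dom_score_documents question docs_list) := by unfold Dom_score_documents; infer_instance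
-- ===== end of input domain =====

-- B replaces A's build-scores + stable reverse sort + positive filter with a sortless
-- per-score selection sweep from the highest possible score down to 1 (objective: alternative).

-- ===== PORT A =====
def score_documents (question : String) (docs_list : List (List (String × String))) : List (List (String × String)) :=
  let q_words := PySem.Set.ofList (PySem.Str.split₀ (PySem.Str.lower question))
  let scored := docs_list.foldl (fun scored d =>
    let text := PySem.Str.lower (((PySem.Dict.ofList d).get? "preview").getD "")
    if text = "" then scored ++ [((0 : Int), d)]
    else scored ++ [(PySem.Set.len (PySem.Set.inter q_words (PySem.Set.ofList (PySem.Str.split₀ text))), d)]) []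
  let sortd := PySem.List.sorted scored (fun x => x.1) true
  (sortd.filter (fun x => decide ((0 : Int) < x.1))).map (fun x => x.2)

-- ===== PORT B =====
def pvScoreB (qw : PySem.Set String) (d : List (String × String)) : Int :=
  PySem.Set.len (PySem.Set.inter qw
    (PySem.Set.ofList (PySem.Str.split₀ (PySem.Str.lower (((PySem.Dict.ofList d).get? "preview").getD "")))))

-- the 'while s > 0' countdown of Source B, structurally on s
def pvSweep (qw : PySem.Set String) (docs : List (List (String × String))) : Nat → List (List (String × String))
  | 0 => []
  | s + 1 => docs.filter (fun d => pvScoreB qw d == ((s : Int) + 1)) ++ pvSweep qw docs s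

def score_documents_alt (question : String) (docs_list : List (List (String × String))) : List (List (String × String)) :=
  let q_words := PySem.Set.ofList (PySem.Str.split₀ (PySem.Str.lower question))
  pvSweep q_words docs_list q_words.length

-- ===== PRECONDITION & SPEC =====
def Spec_score_documents (question : String) (docs_list : List (List (String × String))) (out : List (List (String × String))) : Prop := out = score_documents_alt question docs_list
instance (question : String) (docs_list : List (List (String × String))) (out : List (List (String × String))) : Decidable (Spec_score_documents question docs_list out) := by unfold Spec_score_documents; infer_instance

-- ===== CLAIM (what is proved, stated in full; the proofs are below) =====
def Claim_equal_score_documents : Prop := ∀ (question : String) (docs_list : List (List (String × String))), Dom_score_documents question docs_list → Spec_score_documents question docs_list (score_documents question docs_list)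

-- ===== LEMMAS AND PROOFS =====

-- descending score buckets [k, k-1, …, 0] of a scored list (proof helper)
def pvBk {α : Type} : Nat → List (Int × α) → List (Int × α)
  | 0, l => l.filter (fun p => p.1 == 0)
  | s + 1, l => l.filter (fun p => p.1 == (s : Int) + 1) ++ pvBk s l

theorem pvInsertBy_all_true {α : Type} (before : α → α → Bool) (x : α) (zs : List α)
    (h : ∀ z ∈ zs, before x z = true) : PySem.List.insertBy before x zs = x :: zs := by
  cases zs with
  | nil => rfl
  | cons z zs => simp [PySem.List.insertBy, h z (by simp)]

theorem pvInsertBy_append {α : Type} (before : α → α → Bool) (x : α) (ys zs : List α)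
    (h : ∀ y ∈ ys, before x y = false) :
    PySem.List.insertBy before x (ys ++ zs) = ys ++ PySem.List.insertBy before x zs := by
  induction ys with
  | nil => rfl
  | cons y ys ih =>
      simp only [List.cons_append, PySem.List.insertBy, h y (by simp), Bool.false_eq_true, if_false]
      rw [ih (fun y hy => h y (by simp [hy]))]

theorem pvMem_pvBk {α : Type} (k : Nat) (l : List (Int × α)) (p : Int × α)
    (hp : p ∈ pvBk k l) : p ∈ l ∧ p.1 ≤ (k : Int) := by
  induction k with
  | zero =>
      simp only [pvBk, List.mem_filter, beq_iff_eq] at hp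
      exact ⟨hp.1, by omega⟩
  | succ s ih =>
      simp only [pvBk, List.mem_append, List.mem_filter, beq_iff_eq] at hp
      rcases hp with ⟨h1, h2⟩ | h
      · exact ⟨h1, by omega⟩
      · obtain ⟨h1, h2⟩ := ih h
        exact ⟨h1, by omega⟩

theorem pvBk_nil {α : Type} (k : Nat) : pvBk k ([] : List (Int × α)) = [] := by
  induction k with
  | zero => rfl
  | succ s ih => simp [pvBk, ih]

theorem pvBk_gt {α : Type} (k : Nat) (l : List (Int × α)) (x : Int × α)
    (hx : (k : Int) < x.1) : pvBk k (l ++ [x]) = pvBk k l := by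
  induction k with
  | zero =>
      simp only [pvBk, List.filter_append]
      have : (¬ (x.1 = (0:Int))) := by omega
      simp [this]
  | succ s ih =>
      simp only [pvBk, List.filter_append]
      have : (¬ (x.1 = (s:Int)+1)) := by omega
      simp [this, ih (by omega)]

theorem pvInsert_pvBk {α : Type} (k : Nat) (l : List (Int × α)) (x : Int × α)
    (hx0 : 0 ≤ x.1) (hxk : x.1 ≤ (k : Int)) :
    PySem.List.insertBy (fun a b => decide (b.1 < a.1)) x (pvBk k l) = pvBk k (l ++ [x]) := by
  induction k with
  | zero =>
      have hx : x.1 = 0 := by omega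
      simp only [pvBk, List.filter_append]
      rw [PySem.List.insertBy_of_forall_not_before]
      · simp [hx]
      · intro y hy
        simp only [List.mem_filter, beq_iff_eq] at hy
        simp [hy.2, hx]
  | succ s ih =>
      simp only [pvBk, List.filter_append]
      by_cases hcase : x.1 = (s : Int) + 1
      · rw [pvInsertBy_append _ _ _ _ (fun y hy => by
            simp only [List.mem_filter, beq_iff_eq] at hy
            simp [hy.2, hcase]),
          pvInsertBy_all_true _ _ _ (fun z hz => by
            have := pvMem_pvBk s l z hz
            simp only [decide_eq_true_eq]
            omega),
          pvBk_gt s l x (by omega)]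
        simp [hcase]
      · have hxs : x.1 ≤ (s : Int) := by omega
        rw [pvInsertBy_append _ _ _ _ (fun y hy => by
            simp only [List.mem_filter, beq_iff_eq] at hy
            simp only [decide_eq_false_iff_not, not_lt]
            omega),
          ih hxs]
        simp [hcase]

theorem pvSorted_eq_pvBk {α : Type} (k : Nat) (l : List (Int × α))
    (hl : ∀ p ∈ l, 0 ≤ p.1 ∧ p.1 ≤ (k : Int)) :
    PySem.List.sorted l (fun x => x.1) true = pvBk k l := by
  rw [PySem.List.sorted_rev_eq_foldl_insertBy]
  induction l using List.reverseRecOn with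
  | nil => rw [pvBk_nil]; rfl
  | append_singleton l x ih =>
      rw [List.foldl_append, List.foldl_cons, List.foldl_nil,
        ih (fun p hp => hl p (by simp [hp]))]
      exact pvInsert_pvBk k l x (hl x (by simp)).1 (hl x (by simp)).2

theorem pvFilter_map_pvBk (qw : PySem.Set String) (docs : List (List (String × String))) (k : Nat) :
    ((pvBk k (docs.map (fun d => (pvScoreB qw d, d)))).filter (fun x => decide ((0 : Int) < x.1))).map (fun x => x.2)
      = pvSweep qw docs k := by
  induction k with
  | zero =>
      simp only [pvBk, pvSweep, List.filter_filter]
      rw [List.filter_eq_nil_iff.mpr, List.map_nil]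
      intro p hp
      simp only [Bool.and_eq_true, beq_iff_eq, decide_eq_true_eq]
      omega
  | succ s ih =>
      simp only [pvBk, pvSweep, List.filter_append, List.map_append, ih]
      congr 1
      rw [List.filter_map]
      have h1 : List.filter ((fun x => x.1 == (s : Int) + 1) ∘ (fun d => (pvScoreB qw d, d))) docs
          = docs.filter (fun d => pvScoreB qw d == (s : Int) + 1) := rfl
      rw [h1, List.filter_eq_self.mpr]
      · simp [List.map_map, Function.comp_def]
      · intro x hx
        simp only [List.mem_map, List.mem_filter, beq_iff_eq] at hx
        obtain ⟨d, ⟨_, hd⟩, rfl⟩ := hx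
        simp only [decide_eq_true_eq]
        omega

theorem pvScored_eq_map (qw : PySem.Set String) (docs : List (List (String × String)))
    (init : List (Int × List (String × String))) :
    docs.foldl (fun scored d =>
      let text := PySem.Str.lower (((PySem.Dict.ofList d).get? "preview").getD "")
      if text = "" then scored ++ [((0 : Int), d)]
      else scored ++ [(PySem.Set.len (PySem.Set.inter qw (PySem.Set.ofList (PySem.Str.split₀ text))), d)]) init
    = init ++ docs.map (fun d => (pvScoreB qw d, d)) := by
  induction docs generalizing init with
  | nil => simp
  | cons d docs ih =>
      simp only [List.foldl_cons, List.map_cons]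
      rw [ih]
      by_cases h : PySem.Str.lower (((PySem.Dict.ofList d).get? "preview").getD "") = ""
      · rw [if_pos h]
        have hs : pvScoreB qw d = 0 := by
          unfold pvScoreB
          rw [h]
          have h0 : PySem.Str.split₀ "" = ([] : List String) := rfl
          rw [h0]
          simp [PySem.Set.inter, PySem.Set.ofList, PySem.Set.len]
        rw [hs]
        simp
      · simp [h, pvScoreB]

theorem pvScoreB_nonneg (qw : PySem.Set String) (d : List (String × String)) : 0 ≤ pvScoreB qw d := by
  unfold pvScoreB
  simp [PySem.Set.len]

theorem pvScoreB_le (qw : PySem.Set String) (d : List (String × String)) :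
    pvScoreB qw d ≤ (qw.length : Int) := by
  unfold pvScoreB
  simp only [PySem.Set.len, PySem.Set.inter]
  exact_mod_cast List.length_filter_le _ _

-- ===== VERDICT (by name: the statement is the Claim_ definition above) =====
theorem score_documents_spec : Claim_equal_score_documents := by
  intro question docs_list _
  unfold Spec_score_documents score_documents score_documents_alt
  simp only []
  rw [pvScored_eq_map, List.nil_append,
    pvSorted_eq_pvBk (PySem.Set.ofList (PySem.Str.split₀ (PySem.Str.lower question))).length
      _ (by
        intro p hp
        simp only [List.mem_map] at hp
        obtain ⟨d, _, rfl⟩ := hp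
        exact ⟨pvScoreB_nonneg _ d, pvScoreB_le _ d⟩),
    pvFilter_map_pvBk]
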